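-- pv_equiv track=rewrite | github.com/ballib/Forritun1 | Gagnavinnsla/prufa.py | most_teams
-- ===== SOURCE A (Python) =====
-- def most_teams(data):
--     biggest_team = {}
--     for persons in data['Participants']:
--         for team in persons.split(' vs. '):
--             if team not in biggest_team:
--                 biggest_team[team] = 0
--             biggest_team[team] = len(team.split(","))
--     biggest_team_max = max(biggest_team, key=biggest_team.get)
--     biggest_numbers_max = biggest_team[biggest_team_max]
--     return biggest_team_max, biggest_numbers_max
-- ===== SOURCE B (Python) =====
-- def most_teams(data):
--     teams = [team for persons in data['Participants']
--                   for team in persons.split(' vs. ')]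
--     m = max(len(team.split(',')) for team in teams)
--     winner = next(team for team in teams if len(team.split(',')) == m)
--     return winner, m
-- ===== Notes on version B (the rewrite author's own statement) =====
-- stated objective: simpler
-- what changed: Replaces the dict accumulation and key-argmax with staged passes: flatten all team strings into one list, take the maximum member count, then scan for the first team reaching it, which reproduces max(dict, key=dict.get)'s first-maximum tie-breaking over insertion order.
import Mathlib
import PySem

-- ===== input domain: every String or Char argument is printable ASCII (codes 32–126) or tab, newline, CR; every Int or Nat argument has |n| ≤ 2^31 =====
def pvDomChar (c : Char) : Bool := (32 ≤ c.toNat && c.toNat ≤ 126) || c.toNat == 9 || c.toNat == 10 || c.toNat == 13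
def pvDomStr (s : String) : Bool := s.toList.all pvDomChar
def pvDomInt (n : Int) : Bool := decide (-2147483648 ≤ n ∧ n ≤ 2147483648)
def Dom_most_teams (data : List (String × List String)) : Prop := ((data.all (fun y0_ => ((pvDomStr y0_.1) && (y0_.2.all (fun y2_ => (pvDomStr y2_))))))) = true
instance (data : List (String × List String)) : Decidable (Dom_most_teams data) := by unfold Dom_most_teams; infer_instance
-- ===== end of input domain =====

-- B drops A's dict accumulation in favour of staged passes (flatten, take the max count,
-- scan for the first team reaching it); return values are proved equal on Pre_ (no mutation).

-- ===== PORT A =====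
def most_teams (data : List (String × List String)) : String × Int :=
  let participants := ((PySem.Dict.mk data).get? "Participants").getD []
  let biggest_team := participants.foldl (fun (bt : PySem.Dict String Int) (persons : String) =>
      ((PySem.Str.split? persons " vs. ").getD []).foldl (fun (bt : PySem.Dict String Int) (team : String) =>
        (if bt.contains team then bt else bt.insert team 0).insert team
          ((((PySem.Str.split? team ",").getD []).length : Int))) bt)
    (PySem.Dict.empty : PySem.Dict String Int)
  match PySem.List.max? biggest_team.keys (fun k => biggest_team.getD k 0) with
  | some m => (m, biggest_team.getD m 0)
  | none => ("", 0)   -- Python: max({}) raises ValueError; excluded by Pre_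

-- ===== PORT B =====
-- len(team.split(","))  (B's member count of one team string)
def pvCount (team : String) : Int := (((PySem.Str.split? team ",").getD []).length : Int)

def most_teams_alt (data : List (String × List String)) : String × Int :=
  let teams := (((PySem.Dict.mk data).get? "Participants").getD []).flatMap
      (fun persons => (PySem.Str.split? persons " vs. ").getD [])
  match PySem.List.max? (teams.map pvCount) (fun c => c) with
  | none => ("", 0)   -- Python: max() of an empty generator raises ValueError; excluded by Pre_
  | some m =>
    match teams.find? (fun team => pvCount team == m) with
    | some winner => (winner, m)
    | none => ("", 0)   -- unreachable: m is the count of some team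

-- ===== PRECONDITION & SPEC =====
-- Pre_ excludes exactly the inputs where the Python A raises: a missing 'Participants' key
-- (KeyError on data['Participants']) or an empty participants list (the dict stays empty and
-- max({}) raises ValueError).  B raises KeyError/ValueError on the same inputs.
def Pre_most_teams (data : List (String × List String)) : Prop :=
  ((PySem.Dict.mk data).get? "Participants").getD [] ≠ []
instance (data : List (String × List String)) : Decidable (Pre_most_teams data) := by unfold Pre_most_teams; infer_instance
def pvWitness_most_teams : (List (String × List String)) := [("Participants", ["a,b vs. c"])]

def Spec_most_teams (data : List (String × List String)) (out : String × Int) : Prop := out = most_teams_alt data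
instance (data : List (String × List String)) (out : String × Int) : Decidable (Spec_most_teams data out) := by unfold Spec_most_teams; infer_instance

-- ===== CLAIM (what is proved, stated in full; the proofs are below) =====
def Claim_equal_most_teams : Prop := ∀ (data : List (String × List String)), Dom_most_teams data → Pre_most_teams data → Spec_most_teams data (most_teams data)

-- ===== LEMMAS AND PROOFS =====

-- the step function of PySem.List.max? at key `key`, written out
def pvStep (key : String → Int) (acc : Option String) (x : String) : Option String :=
  match acc with
  | none => some x
  | some m => if key m < key x then some x else some m

theorem pv_max?_unfold (key : String → Int) (xs : List String) :
    PySem.List.max? xs key = xs.foldl (pvStep key) none := by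
  unfold PySem.List.max?
  congr 1
  funext acc x
  cases acc <;> rfl

-- A's conditional double insert collapses to one insert
theorem pv_collapse :
    (fun (bt : PySem.Dict String Int) (team : String) =>
        (if bt.contains team then bt else bt.insert team 0).insert team
          ((((PySem.Str.split? team ",").getD []).length : Int)))
      = fun bt team => bt.insert team (pvCount team) := by
  funext bt team
  by_cases h : bt.contains team
  · simp [h, pvCount]
  · simp only [h, Bool.false_eq_true, if_false]
    exact PySem.Dict.insert_insert_self bt team 0 (pvCount team)

-- every key of A's dict holds len(key.split(","))
theorem pv_getD_foldl (l : List String) : ∀ (d : PySem.Dict String Int) (k : String),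
    (l.foldl (fun bt t => bt.insert t (pvCount t)) d).getD k 0
      = if k ∈ l then pvCount k else d.getD k 0 := by
  induction l with
  | nil => intro d k; simp
  | cons x xs ih =>
    intro d k
    rw [List.foldl_cons, ih, PySem.Dict.getD_insert]
    by_cases hk : k ∈ xs
    · simp [hk]
    · by_cases hkx : k = x
      · subst hkx; simp [hk]
      · simp [hk, hkx]

-- the max?-fold only looks at key values of members
theorem pv_foldl_congr (g h : String → Int) : ∀ (xs : List String) (acc : Option String),
    (∀ x ∈ xs, g x = h x) → (∀ m, acc = some m → g m = h m) →
    xs.foldl (pvStep g) acc = xs.foldl (pvStep h) acc := by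
  intro xs
  induction xs with
  | nil => intro acc _ _; rfl
  | cons x xs ih =>
    intro acc hmem hacc
    have hx : g x = h x := hmem x (by simp)
    rw [List.foldl_cons, List.foldl_cons]
    cases acc with
    | none =>
      exact ih (some x) (fun y hy => hmem y (by simp [hy])) (fun m hm => by cases hm; exact hx)
    | some m =>
      have hm : g m = h m := hacc m rfl
      simp only [pvStep, hm, hx]
      split
      · exact ih (some x) (fun y hy => hmem y (by simp [hy])) (fun m' hm' => by cases hm'; exact hx)
      · exact ih (some m) (fun y hy => hmem y (by simp [hy])) (fun m' hm' => by cases hm'; exact hm)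

theorem pv_max?_congr (g h : String → Int) (xs : List String)
    (hgh : ∀ x ∈ xs, g x = h x) : PySem.List.max? xs g = PySem.List.max? xs h := by
  rw [pv_max?_unfold, pv_max?_unfold]
  exact pv_foldl_congr g h xs none hgh (fun m hm => by cases hm)

theorem pv_max?_append (l : List String) (x : String) (key : String → Int) :
    PySem.List.max? (l ++ [x]) key = pvStep key (PySem.List.max? l key) x := by
  rw [pv_max?_unfold, pv_max?_unfold, List.foldl_append]
  rfl

-- deduplication does not change the first maximum
theorem pv_max?_ofList (key : String → Int) (xs : List String) :
    PySem.List.max? (PySem.Set.ofList xs) key = PySem.List.max? xs key := by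
  induction xs using List.reverseRecOn with
  | nil => rfl
  | append_singleton l x ih =>
    rw [PySem.Set.ofList_append_singleton, PySem.Set.add_eq_ite]
    by_cases hx : x ∈ PySem.Set.ofList l
    · rw [if_pos hx, ih, pv_max?_append]
      have hmem : x ∈ l := (PySem.Set.mem_ofList l x).mp hx
      have hne : l ≠ [] := by rintro rfl; simp at hmem
      obtain ⟨m, hm⟩ : ∃ m, PySem.List.max? l key = some m := by
        cases h : PySem.List.max? l key with
        | none => exact absurd ((PySem.List.max?_eq_none_iff l key).mp h) hne
        | some m => exact ⟨m, rfl⟩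
      have hle : key x ≤ key m := PySem.List.max?_isMax hm x hmem
      rw [hm]
      simp only [pvStep, if_neg (by omega : ¬ key m < key x)]
    · rw [if_neg hx, pv_max?_append, pv_max?_append, ih]

-- the running maximum's key never decreases along the fold
theorem pv_foldl_mono (key : String → Int) : ∀ (xs : List String) (m t : String),
    xs.foldl (pvStep key) (some m) = some t → key m ≤ key t := by
  intro xs
  induction xs with
  | nil => intro m t h; cases h; exact le_refl _
  | cons x xs ih =>
    intro m t h
    rw [List.foldl_cons] at h
    by_cases hmx : key m < key x
    · simp only [pvStep, if_pos hmx] at h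
      have := ih x t h
      omega
    · simp only [pvStep, if_neg hmx] at h
      exact ih m t h

-- the fold's answer is the first element whose key equals the answer's key
-- (unless nothing beat the seed, in which case the answer is the seed)
theorem pv_foldl_first (key : String → Int) : ∀ (xs : List String) (m t : String),
    xs.foldl (pvStep key) (some m) = some t →
    (key t ≤ key m → t = m) ∧
    (key m < key t → xs.find? (fun x => key x == key t) = some t) := by
  intro xs
  induction xs with
  | nil =>
    intro m t h; cases h
    exact ⟨fun _ => rfl, fun h => absurd h (lt_irrefl _)⟩
  | cons x xs ih =>
    intro m t h
    rw [List.foldl_cons] at h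
    by_cases hmx : key m < key x
    · simp only [pvStep, if_pos hmx] at h
      have hxt : key x ≤ key t := pv_foldl_mono key xs x t h
      constructor
      · intro hle; omega
      · intro _
        by_cases hcmp : key t ≤ key x
        · have ht : t = x := (ih x t h).1 hcmp
          subst ht
          rw [List.find?_cons_of_pos (by simp)]
        · rw [List.find?_cons_of_neg (by simp; omega)]
          exact (ih x t h).2 (by omega)
    · simp only [pvStep, if_neg hmx] at h
      have hmt : key m ≤ key t := pv_foldl_mono key xs m t h
      constructor
      · exact fun hle => (ih m t h).1 hle
      · intro hlt
        rw [List.find?_cons_of_neg (by simp; omega)]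
        exact (ih m t h).2 hlt

-- max? returns the FIRST element achieving the maximal key
theorem pv_max?_find (key : String → Int) (xs : List String) (t : String)
    (h : PySem.List.max? xs key = some t) :
    xs.find? (fun x => key x == key t) = some t := by
  cases xs with
  | nil => simp [PySem.List.max?] at h
  | cons y ys =>
    rw [pv_max?_unfold] at h
    rw [List.foldl_cons] at h
    have hyt : key y ≤ key t := pv_foldl_mono key ys y t h
    by_cases hlt : key y < key t
    · rw [List.find?_cons_of_neg (by simp; omega)]
      exact (pv_foldl_first key ys y t h).2 hlt
    · have ht : t = y := (pv_foldl_first key ys y t h).1 (by omega)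
      subst ht
      rw [List.find?_cons_of_pos (by simp)]

-- the maximum of the mapped counts is the key of max?'s answer
theorem pv_max?_map (key : String → Int) (xs : List String) (t : String)
    (h : PySem.List.max? xs key = some t) :
    PySem.List.max? (xs.map key) (fun c => c) = some (key t) := by
  have htmem : t ∈ xs := PySem.List.max?_mem h
  have hne : xs.map key ≠ [] := by
    intro hc
    rw [List.map_eq_nil_iff] at hc
    subst hc; simp at htmem
  obtain ⟨v, hv⟩ : ∃ v, PySem.List.max? (xs.map key) (fun c => c) = some v := by
    cases hc : PySem.List.max? (xs.map key) (fun c => c) with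
    | none => exact absurd ((PySem.List.max?_eq_none_iff _ _).mp hc) hne
    | some v => exact ⟨v, rfl⟩
  have hv_mem : v ∈ xs.map key := PySem.List.max?_mem hv
  obtain ⟨x, hx_mem, hx_eq⟩ := List.mem_map.mp hv_mem
  have h1 : v ≤ key t := hx_eq ▸ PySem.List.max?_isMax h x hx_mem
  have h2 : key t ≤ v := PySem.List.max?_isMax hv (key t) (List.mem_map_of_mem htmem)
  rw [hv]
  congr 1
  omega

-- the common core: both bodies, starting from the same participants list
theorem pv_core (ps : List String) :
    (let biggest_team := ps.foldl (fun (bt : PySem.Dict String Int) (persons : String) =>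
        ((PySem.Str.split? persons " vs. ").getD []).foldl (fun (bt : PySem.Dict String Int) (team : String) =>
          (if bt.contains team then bt else bt.insert team 0).insert team
            ((((PySem.Str.split? team ",").getD []).length : Int))) bt)
      (PySem.Dict.empty : PySem.Dict String Int)
     match PySem.List.max? biggest_team.keys (fun k => biggest_team.getD k 0) with
     | some m => (m, biggest_team.getD m 0)
     | none => ("", 0))
    = (let teams := ps.flatMap (fun persons => (PySem.Str.split? persons " vs. ").getD [])
       match PySem.List.max? (teams.map pvCount) (fun c => c) with
       | none => ("", 0)
       | some m =>
         match teams.find? (fun team => pvCount team == m) with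
         | some winner => (winner, m)
         | none => ("", 0)) := by
  simp only [pv_collapse]
  rw [← List.foldl_flatMap]
  set toks := ps.flatMap (fun p => (PySem.Str.split? p " vs. ").getD []) with htoks
  have hkeys : (toks.foldl (fun bt t => bt.insert t (pvCount t)) (PySem.Dict.empty : PySem.Dict String Int)).keys
      = PySem.Set.ofList toks := by
    have h := PySem.Dict.keys_foldl_insert toks (fun _ t => pvCount t) (PySem.Dict.empty : PySem.Dict String Int)
    rw [PySem.Dict.keys_empty, PySem.Set.update_nil_left] at h
    exact h
  have hgetD : ∀ k, k ∈ toks →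
      (toks.foldl (fun bt t => bt.insert t (pvCount t)) (PySem.Dict.empty : PySem.Dict String Int)).getD k 0 = pvCount k := by
    intro k hk
    rw [pv_getD_foldl, if_pos hk]
  have hmax : PySem.List.max?
      (toks.foldl (fun bt t => bt.insert t (pvCount t)) (PySem.Dict.empty : PySem.Dict String Int)).keys
      (fun k => (toks.foldl (fun bt t => bt.insert t (pvCount t)) (PySem.Dict.empty : PySem.Dict String Int)).getD k 0)
      = PySem.List.max? toks pvCount := by
    rw [hkeys]
    rw [pv_max?_congr _ pvCount _ (fun x hx => hgetD x ((PySem.Set.mem_ofList toks x).mp hx))]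
    exact pv_max?_ofList pvCount toks
  simp only [hmax]
  cases h : PySem.List.max? toks pvCount with
  | none =>
    have : toks = [] := (PySem.List.max?_eq_none_iff _ _).mp h
    simp [this, PySem.List.max?]
  | some t =>
    have hmem : t ∈ toks := PySem.List.max?_mem h
    rw [pv_max?_map pvCount toks t h]
    simp only [pv_max?_find pvCount toks t h, hgetD t hmem]

-- ===== VERDICT (by name: the statement is the Claim_ definition above) =====
theorem most_teams_spec : Claim_equal_most_teams := by
  intro data _dom _pre
  unfold Spec_most_teams most_teams most_teams_alt
  exact pv_core _
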